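-- pv_equiv track=rewrite | github.com/MGH-LMIC/PDS_public | Feature_Extractor/nlp_module/extractor.py | remove_submatches
-- ===== SOURCE A (Python) =====
-- def remove_submatches(matches_to_search):
--     unique_matches = []
--
--     while len(matches_to_search) > 0:
--         match1 = max(matches_to_search, key=len)
--         related_matches = [match1]
--         matches_to_search.remove(match1)
--         for match2 in matches_to_search:
--             if match2 in match1:
--                 related_matches.append(match2)
--         unique_matches.append(max(related_matches, key=len))
--         for match in related_matches:
--             if match in matches_to_search:
--                 matches_to_search.remove(match)
--     return unique_matches
-- ===== SOURCE B (Python) =====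
-- def remove_submatches(matches_to_search):
--     result = []
--     for s in sorted(matches_to_search, key=len, reverse=True):
--         if not any(s in kept for kept in result):
--             result.append(s)
--     matches_to_search.clear()
--     return result
-- ===== Notes on version B (the rewrite author's own statement) =====
-- stated objective: faster
-- what changed: A's repeated max-scan-and-remove while-loop is replaced by one stable length-descending sort followed by a single pass that keeps a string unless it is a substring of an already-kept one (B also reproduces A's side effect of emptying its argument with a final clear()).
import Mathlib
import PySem

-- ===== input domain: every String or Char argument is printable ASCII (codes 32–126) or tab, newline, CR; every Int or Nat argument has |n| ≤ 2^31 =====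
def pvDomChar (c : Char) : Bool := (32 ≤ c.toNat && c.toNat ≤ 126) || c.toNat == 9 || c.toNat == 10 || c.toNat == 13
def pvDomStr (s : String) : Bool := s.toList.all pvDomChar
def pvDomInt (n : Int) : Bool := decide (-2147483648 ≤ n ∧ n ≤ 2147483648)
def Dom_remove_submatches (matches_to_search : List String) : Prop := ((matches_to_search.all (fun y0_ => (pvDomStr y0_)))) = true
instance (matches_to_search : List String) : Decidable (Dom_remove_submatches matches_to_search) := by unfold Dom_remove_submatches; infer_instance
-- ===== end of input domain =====

-- B replaces A's repeated max-scan-and-remove while-loop by one stable length-descending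
-- sort plus a single filtered pass (objective: simpler). A empties its argument in place;
-- the Python B performs the same mutation (a final .clear()); the equivalence proved here
-- is about the return value.

-- ===== PORT A =====
-- key=len of Python's max(..., key=len)
def pvKey (s : String) : Int := PySem.Str.len s

-- "for match in related_matches: if match in matches_to_search: matches_to_search.remove(match)"
def pvRemoveLoop (related ms : List String) : List String :=
  related.foldl (fun cur x => if cur.contains x then (PySem.List.remove? cur x).getD cur else cur) ms

-- needed by pvGoA's termination proof
theorem pvRemoveLoop_len_le (related : List String) :
    ∀ ms : List String, (pvRemoveLoop related ms).length ≤ ms.length := by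
  induction related with
  | nil => intro ms; simp [pvRemoveLoop]
  | cons x rel ih =>
    intro ms
    have hstep : pvRemoveLoop (x :: rel) ms
        = pvRemoveLoop rel (if ms.contains x then (PySem.List.remove? ms x).getD ms else ms) := rfl
    rw [hstep]
    refine le_trans (ih _) ?_
    by_cases hx : x ∈ ms
    · have hc : ms.contains x = true := by simpa using hx
      rw [hc, if_pos rfl, PySem.List.remove?_eq_some_erase ms x hx]
      have := List.length_erase_of_mem hx
      simp only [Option.getD_some]
      omega
    · have hc : ms.contains x = false := by simpa using hx
      rw [hc]
      simp

-- the while-loop of A, with unique_matches as accumulator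
def pvGoA (ms acc : List String) : List String :=
  if hlen : 0 < ms.length then
    match PySem.List.max? ms pvKey with
    | none => acc
    | some m1 =>
      match h2 : PySem.List.remove? ms m1 with
      | none => acc
      | some ms1 =>
        let related := ms1.foldl (fun rel m2 => if PySem.Str.isIn m2 m1 then rel ++ [m2] else rel) [m1]
        let u := (PySem.List.max? related pvKey).getD m1
        pvGoA (pvRemoveLoop related ms1) (acc ++ [u])
  else acc
termination_by ms.length
decreasing_by
  have hmem : m1 ∈ ms := by
    by_contra hmem
    rw [(PySem.List.remove?_eq_none_iff ms m1).mpr hmem] at h2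
    simp at h2
  rw [PySem.List.remove?_eq_some_erase ms m1 hmem] at h2
  have hms1 : ms1 = ms.erase m1 := (Option.some.inj h2).symm
  have h1 : ms1.length = ms.length - 1 := by
    rw [hms1]; exact List.length_erase_of_mem hmem
  exact lt_of_le_of_lt (pvRemoveLoop_len_le _ ms1) (by omega)

def remove_submatches (matches_to_search : List String) : List String :=
  pvGoA matches_to_search []

-- ===== PORT B =====
-- one pass of Source B's for-loop: keep s unless it is a substring of an already kept string
def pvStepB (result : List String) (s : String) : List String :=
  if result.any (fun kept => PySem.Str.isIn s kept) then result else result ++ [s]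

def remove_submatches_alt (matches_to_search : List String) : List String :=
  (PySem.List.sorted matches_to_search pvKey true).foldl pvStepB []

-- ===== PRECONDITION & SPEC =====
def Spec_remove_submatches (matches_to_search : List String) (out : List String) : Prop := out = remove_submatches_alt matches_to_search
instance (matches_to_search : List String) (out : List String) : Decidable (Spec_remove_submatches matches_to_search out) := by unfold Spec_remove_submatches; infer_instance

-- ===== CLAIM (what is proved, stated in full; the proofs are below) =====
def Claim_equal_remove_submatches : Prop := ∀ (matches_to_search : List String), Dom_remove_submatches matches_to_search → Spec_remove_submatches matches_to_search (remove_submatches matches_to_search)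

-- ===== LEMMAS AND PROOFS =====

theorem pvIsIn_self (m : String) : PySem.Str.isIn m m = true :=
  (PySem.Str.isIn_iff_infix m m).mpr (List.infix_refl _)

theorem pvKey_le_of_isIn {x m : String} (h : PySem.Str.isIn x m = true) : pvKey x ≤ pvKey m := by
  have := ((PySem.Str.isIn_iff_infix x m).mp h).length_le
  simp only [pvKey, PySem.Str.len_eq]
  exact_mod_cast this

-- ---- max? facts ----

-- proof-side name for the fold step inside PySem.List.max?
def pvMaxStep (acc : Option String) (x : String) : Option String :=
  match acc with
  | none => some x
  | some m => if pvKey m < pvKey x then some x else some m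

theorem pvMax?_eq (xs : List String) : PySem.List.max? xs pvKey = xs.foldl pvMaxStep none := by
  simp only [PySem.List.max?]
  congr 1
  funext acc x
  cases acc <;> rfl

theorem pvMaxKeep (t : List String) : ∀ a : String, (∀ y ∈ t, pvKey y ≤ pvKey a) →
    t.foldl pvMaxStep (some a) = some a := by
  induction t with
  | nil => intro a _; rfl
  | cons y t ih =>
    intro a h
    have hy : ¬ pvKey a < pvKey y := not_lt.mpr (h y (List.mem_cons_self))
    simp only [List.foldl_cons, pvMaxStep, if_neg hy]
    exact ih a (fun z hz => h z (List.mem_cons_of_mem _ hz))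

theorem pvMaxHead {t : List String} {m : String} (h : ∀ y ∈ t, pvKey y ≤ pvKey m) :
    PySem.List.max? (m :: t) pvKey = some m := by
  rw [pvMax?_eq, List.foldl_cons]
  exact pvMaxKeep t m h

theorem pvMaxAux (t : List String) : ∀ a m : String,
    t.foldl pvMaxStep (some a) = some m →
    pvKey a ≤ pvKey m ∧ (m = a ∨ ∃ pre suf, t = pre ++ m :: suf ∧ pvKey a < pvKey m ∧ ∀ y ∈ pre, pvKey y < pvKey m) := by
  induction t with
  | nil =>
    intro a m h
    have : m = a := (Option.some.inj h).symm
    exact ⟨le_of_eq (by rw [this]), Or.inl this⟩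
  | cons x t ih =>
    intro a m h
    by_cases hax : pvKey a < pvKey x
    · simp only [List.foldl_cons, pvMaxStep, if_pos hax] at h
      obtain ⟨hxm, hc⟩ := ih x m h
      refine ⟨le_of_lt (lt_of_lt_of_le hax hxm), Or.inr ?_⟩
      rcases hc with rfl | ⟨pre, suf, rfl, hlt, hpre⟩
      · exact ⟨[], t, rfl, hax, by simp⟩
      · exact ⟨x :: pre, suf, rfl, lt_of_lt_of_le hax hxm,
          by
            intro y hy
            rcases List.mem_cons.mp hy with rfl | hy
            · exact hlt
            · exact hpre y hy⟩
    · simp only [List.foldl_cons, pvMaxStep, if_neg hax] at h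
      obtain ⟨ham, hc⟩ := ih a m h
      refine ⟨ham, ?_⟩
      rcases hc with rfl | ⟨pre, suf, rfl, hlt, hpre⟩
      · exact Or.inl rfl
      · refine Or.inr ⟨x :: pre, suf, rfl, hlt, ?_⟩
        intro y hy
        rcases List.mem_cons.mp hy with rfl | hy
        · exact lt_of_le_of_lt (not_lt.mp hax) hlt
        · exact hpre y hy

theorem pvMax_decomp {ms : List String} {m : String} (h : PySem.List.max? ms pvKey = some m) :
    ∃ pre suf, ms = pre ++ m :: suf ∧ ∀ y ∈ pre, pvKey y < pvKey m := by
  cases ms with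
  | nil => exact absurd h (by simp [PySem.List.max?])
  | cons x t =>
    rw [pvMax?_eq, List.foldl_cons] at h
    simp only [pvMaxStep] at h
    obtain ⟨_, hc⟩ := pvMaxAux t x m h
    rcases hc with rfl | ⟨pre, suf, rfl, hlt, hpre⟩
    · exact ⟨[], t, rfl, by simp⟩
    · refine ⟨x :: pre, suf, rfl, ?_⟩
      intro y hy
      rcases List.mem_cons.mp hy with rfl | hy
      · exact hlt
      · exact hpre y hy

-- ---- the erase-fold of the removal loop ----

theorem pvStep_erase (cur : List String) (x : String) :
    (if cur.contains x then (PySem.List.remove? cur x).getD cur else cur) = cur.erase x := by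
  by_cases h : x ∈ cur
  · have hc : cur.contains x = true := by simpa using h
    rw [if_pos hc, PySem.List.remove?_eq_some_erase cur x h]; rfl
  · have hc : cur.contains x = false := by simpa using h
    rw [if_neg (by simpa using h), List.erase_of_not_mem h]

theorem pvRemoveLoop_eq_erase (related ms : List String) :
    pvRemoveLoop related ms = related.foldl (fun cur x => cur.erase x) ms := by
  unfold pvRemoveLoop
  simp only [pvStep_erase]

theorem pvEraseFold_cons (p : String → Bool) (rel : List String) :
    ∀ (x : String) (t : List String), (∀ v ∈ rel, p v = true) → p x = false →
    rel.foldl (fun cur v => cur.erase v) (x :: t) = x :: rel.foldl (fun cur v => cur.erase v) t := by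
  induction rel with
  | nil => intro x t _ _; rfl
  | cons v rel ih =>
    intro x t hall hx
    have hvx : ¬ (x == v) = true := by
      intro hvx
      have : x = v := by simpa using hvx
      rw [this, hall v List.mem_cons_self] at hx
      exact Bool.noConfusion hx
    simp only [List.foldl_cons, List.erase_cons_tail hvx]
    exact ih x (t.erase v) (fun w hw => hall w (List.mem_cons_of_mem _ hw)) hx

theorem pvEraseFold_filter (p : String → Bool) :
    ∀ t : List String, (t.filter p).foldl (fun cur v => cur.erase v) t = t.filter (fun x => !p x) := by
  intro t
  induction t with
  | nil => rfl
  | cons x t ih =>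
    by_cases hx : p x = true
    · simp only [List.filter_cons, hx, if_pos, List.foldl_cons, List.erase_cons_head,
        Bool.not_true]
      simpa [hx] using ih
    · have hx' : p x = false := by simpa using hx
      have h1 : (x :: t).filter p = t.filter p := by simp [hx']
      rw [h1, pvEraseFold_cons p (t.filter p) x t (fun v hv => (List.mem_filter.mp hv).2) hx', ih]
      simp [hx']

theorem pvFilter_erase (p : String → Bool) {m : String} (hm : p m = true) :
    ∀ ms : List String, (ms.erase m).filter (fun x => !p x) = ms.filter (fun x => !p x) := by
  intro ms
  induction ms with
  | nil => rfl
  | cons x t ih =>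
    by_cases hx : x = m
    · subst hx
      simp [List.erase_cons_head, hm]
    · have hxm : ¬ (x == m) = true := by simpa using hx
      rw [List.erase_cons_tail hxm]
      simp only [List.filter_cons, ih]

-- ---- one round of A's while loop ----

theorem pvRound {ms : List String} {m : String} (hlen : 0 < ms.length)
    (hmax : PySem.List.max? ms pvKey = some m) (acc : List String) :
    pvGoA ms acc = pvGoA (ms.filter (fun x => !PySem.Str.isIn x m)) (acc ++ [m]) := by
  have hmem : m ∈ ms := PySem.List.max?_mem hmax
  have hrem : PySem.List.remove? ms m = some (ms.erase m) := PySem.List.remove?_eq_some_erase ms m hmem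
  rw [pvGoA]
  rw [dif_pos hlen, hmax]
  have hrel : (ms.erase m).foldl (fun rel m2 => if PySem.Str.isIn m2 m = true then rel ++ [m2] else rel) [m]
      = m :: (ms.erase m).filter (fun m2 => PySem.Str.isIn m2 m) := by
    have := PySem.List.foldl_append_if (fun m2 => PySem.Str.isIn m2 m) (fun x => x) (ms.erase m) [m]
    simpa using this
  -- reduce the dependent match on remove?
  have hmain : ∀ (ms1 : List String), PySem.List.remove? ms m = some ms1 →
      (let related := ms1.foldl (fun rel m2 => if PySem.Str.isIn m2 m then rel ++ [m2] else rel) [m]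
       let u := (PySem.List.max? related pvKey).getD m
       pvGoA (pvRemoveLoop related ms1) (acc ++ [u]))
      = pvGoA (ms.filter (fun x => !PySem.Str.isIn x m)) (acc ++ [m]) := by
    intro ms1 h2
    have hms1 : ms1 = ms.erase m := by
      rw [hrem] at h2; exact (Option.some.inj h2).symm
    subst hms1
    rw [hrel]
    have hkeys : ∀ y ∈ (ms.erase m).filter (fun m2 => PySem.Str.isIn m2 m), pvKey y ≤ pvKey m := by
      intro y hy
      exact pvKey_le_of_isIn (List.mem_filter.mp hy).2
    have hu : (PySem.List.max? (m :: (ms.erase m).filter (fun m2 => PySem.Str.isIn m2 m)) pvKey).getD m = m := by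
      rw [pvMaxHead hkeys]; rfl
    have hperm : (m :: (ms.erase m).filter (fun m2 => PySem.Str.isIn m2 m)).Perm
        ((ms.erase m).filter (fun m2 => PySem.Str.isIn m2 m) ++ [m]) :=
      (List.perm_append_singleton m _).symm
    have hrc : RightCommutative (fun (cur : List String) (x : String) => cur.erase x) :=
      ⟨fun c a b => List.erase_comm a b⟩
    have hfold : pvRemoveLoop (m :: (ms.erase m).filter (fun m2 => PySem.Str.isIn m2 m)) (ms.erase m)
        = ms.filter (fun x => !PySem.Str.isIn x m) := by
      rw [pvRemoveLoop_eq_erase]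
      rw [@List.Perm.foldl_eq _ _ (fun cur x => cur.erase x) _ _ hrc hperm (ms.erase m)]
      rw [List.foldl_append]
      rw [pvEraseFold_filter (fun m2 => PySem.Str.isIn m2 m) (ms.erase m)]
      simp only [List.foldl_cons, List.foldl_nil]
      have hnm : m ∉ (ms.erase m).filter (fun x => !PySem.Str.isIn x m) := by
        intro hmm
        have := (List.mem_filter.mp hmm).2
        rw [pvIsIn_self m] at this
        exact Bool.noConfusion this
      rw [List.erase_of_not_mem hnm]
      exact pvFilter_erase (fun x => PySem.Str.isIn x m) (pvIsIn_self m) ms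
    simp only [hu, hfold]
  -- now discharge the two matches
  split
  · next heq => exact absurd heq (by simp)
  · next m1 heq =>
    have hm1 : m1 = m := (Option.some.inj heq).symm
    subst hm1
    split
    · next heq2 => rw [hrem] at heq2; simp at heq2
    · next ms1 heq2 => exact hmain ms1 heq2

theorem pvGoA_nil (acc : List String) : pvGoA [] acc = acc := by
  rw [pvGoA]; rfl

theorem pvFilter_len_lt {ms : List String} {m : String} (hmem : m ∈ ms) :
    (ms.filter (fun x => !PySem.Str.isIn x m)).length < ms.length := by
  rw [← pvFilter_erase (fun x => PySem.Str.isIn x m) (pvIsIn_self m) ms]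
  have h1 := List.length_filter_le (fun x => !PySem.Str.isIn x m) (ms.erase m)
  have h2 := List.length_erase_of_mem hmem
  have h3 : 0 < ms.length := List.length_pos_of_mem hmem
  omega

theorem pvGoA_acc : ∀ (n : Nat) (ms : List String), ms.length ≤ n →
    ∀ acc, pvGoA ms acc = acc ++ pvGoA ms [] := by
  intro n
  induction n with
  | zero =>
    intro ms hms acc
    have : ms = [] := List.eq_nil_of_length_eq_zero (Nat.le_zero.mp hms)
    subst this
    simp [pvGoA_nil]
  | succ n ih =>
    intro ms hms acc
    by_cases hnil : ms = []
    · subst hnil; simp [pvGoA_nil]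
    · have hlen : 0 < ms.length := List.length_pos_of_ne_nil hnil
      obtain ⟨m, hmax⟩ : ∃ m, PySem.List.max? ms pvKey = some m := by
        cases hm : PySem.List.max? ms pvKey with
        | none => exact absurd ((PySem.List.max?_eq_none_iff ms pvKey).mp hm) hnil
        | some m => exact ⟨m, rfl⟩
      have hmem : m ∈ ms := PySem.List.max?_mem hmax
      have hlt := pvFilter_len_lt hmem
      have hle : (ms.filter (fun x => !PySem.Str.isIn x m)).length ≤ n := by omega
      rw [pvRound hlen hmax acc, pvRound hlen hmax []]
      rw [ih _ hle (acc ++ [m]), ih _ hle ([] ++ [m])]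
      simp

-- ---- stable reverse sort facts ----

theorem pvInsertBy_front {bef : String → String → Bool} {x : String} {l : List String}
    (h : ∀ y ∈ l, bef x y = true) : PySem.List.insertBy bef x l = x :: l := by
  cases l with
  | nil => rfl
  | cons y t => simp [PySem.List.insertBy, h y List.mem_cons_self]

theorem pvS1b : ∀ (suf : List String) (acc : List String) (m : String),
    (∀ y ∈ suf, pvKey y ≤ pvKey m) → (∀ y ∈ acc, pvKey y ≤ pvKey m) →
    suf.foldl (fun acc x => PySem.List.insertBy (fun a b => decide (pvKey b < pvKey a)) x acc) (m :: acc)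
      = m :: suf.foldl (fun acc x => PySem.List.insertBy (fun a b => decide (pvKey b < pvKey a)) x acc) acc := by
  intro suf
  induction suf with
  | nil => intro acc m _ _; rfl
  | cons s suf ih =>
    intro acc m hsuf hacc
    have hs : pvKey s ≤ pvKey m := hsuf s List.mem_cons_self
    have hbef : (decide (pvKey m < pvKey s)) = false := by simpa using not_lt.mpr hs
    simp only [List.foldl_cons]
    have hins : PySem.List.insertBy (fun a b => decide (pvKey b < pvKey a)) s (m :: acc)
        = m :: PySem.List.insertBy (fun a b => decide (pvKey b < pvKey a)) s acc := by
      simp [PySem.List.insertBy, hbef]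
    rw [hins]
    refine ih _ m (fun y hy => hsuf y (List.mem_cons_of_mem _ hy)) ?_
    intro y hy
    rcases (PySem.List.mem_insertBy _ s y acc).mp hy with rfl | hy
    · exact hs
    · exact hacc y hy

theorem pvS1 {ms : List String} {m : String} (hmax : PySem.List.max? ms pvKey = some m) :
    PySem.List.sorted ms pvKey true = m :: PySem.List.sorted (ms.erase m) pvKey true := by
  obtain ⟨pre, suf, rfl, hpre⟩ := pvMax_decomp hmax
  have hall := PySem.List.max?_isMax hmax
  have hmpre : m ∉ pre := fun hm => absurd rfl (ne_of_lt (hpre m hm))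
  have herase : (pre ++ m :: suf).erase m = pre ++ suf := by
    rw [List.erase_append_right _ hmpre, List.erase_cons_head]
  rw [herase, PySem.List.sorted_rev_eq_foldl_insertBy, PySem.List.sorted_rev_eq_foldl_insertBy,
    List.foldl_append, List.foldl_append, List.foldl_cons]
  have hA0 : ∀ y ∈ pre.foldl (fun acc x => PySem.List.insertBy (fun a b => decide (pvKey b < pvKey a)) x acc) [], pvKey y < pvKey m := by
    intro y hy
    rw [← PySem.List.sorted_rev_eq_foldl_insertBy pre pvKey] at hy
    exact hpre y ((PySem.List.mem_sorted pre pvKey true y).mp hy)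
  rw [pvInsertBy_front (fun y hy => by simpa using hA0 y hy)]
  exact pvS1b suf _ m (fun y hy => hall y (by simp [hy])) (fun y hy => le_of_lt (hA0 y hy))

theorem pvIns_pw {acc : List String} (x : String)
    (h : acc.Pairwise (fun a b => pvKey b ≤ pvKey a)) :
    (PySem.List.insertBy (fun a b => decide (pvKey b < pvKey a)) x acc).Pairwise (fun a b => pvKey b ≤ pvKey a) := by
  induction acc with
  | nil => simp [PySem.List.insertBy]
  | cons y t ih =>
    rw [List.pairwise_cons] at h
    obtain ⟨hy, ht⟩ := h
    by_cases hb : pvKey y < pvKey x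
    · simp only [PySem.List.insertBy, hb, decide_true, if_pos]
      rw [List.pairwise_cons]
      refine ⟨?_, by rw [List.pairwise_cons]; exact ⟨hy, ht⟩⟩
      intro z hz
      rcases List.mem_cons.mp hz with rfl | hz
      · exact le_of_lt hb
      · exact le_trans (hy z hz) (le_of_lt hb)
    · have hb' : (decide (pvKey y < pvKey x)) = false := by simpa using hb
      simp only [PySem.List.insertBy, hb', Bool.false_eq_true, if_neg, not_false_iff]
      rw [List.pairwise_cons]
      refine ⟨?_, ih ht⟩
      intro z hz
      rcases (PySem.List.mem_insertBy _ x z t).mp hz with rfl | hz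
      · exact not_lt.mp hb
      · exact hy z hz

theorem pvIns_filter_neg (q : String → Bool) {x : String} (hx : q x = false) (acc : List String) :
    (PySem.List.insertBy (fun a b => decide (pvKey b < pvKey a)) x acc).filter q = acc.filter q := by
  induction acc with
  | nil => simp [PySem.List.insertBy, hx]
  | cons y t ih =>
    by_cases hb : pvKey y < pvKey x
    · simp [PySem.List.insertBy, hb, List.filter_cons, hx]
    · have hb' : (decide (pvKey y < pvKey x)) = false := by simpa using hb
      simp only [PySem.List.insertBy, hb', Bool.false_eq_true, if_neg, not_false_iff]
      simp only [List.filter_cons, ih]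

theorem pvIns_filter_pos (q : String → Bool) {x : String} (hx : q x = true) :
    ∀ acc : List String, acc.Pairwise (fun a b => pvKey b ≤ pvKey a) →
    PySem.List.insertBy (fun a b => decide (pvKey b < pvKey a)) x (acc.filter q)
      = (PySem.List.insertBy (fun a b => decide (pvKey b < pvKey a)) x acc).filter q := by
  intro acc
  induction acc with
  | nil => simp [PySem.List.insertBy, hx]
  | cons y t ih =>
    intro hpw
    rw [List.pairwise_cons] at hpw
    obtain ⟨hy, ht⟩ := hpw
    by_cases hqy : q y = true
    · by_cases hb : pvKey y < pvKey x
      · simp [PySem.List.insertBy, hqy, hb, hx]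
      · have hb' : (decide (pvKey y < pvKey x)) = false := by simpa using hb
        simp only [List.filter_cons, hqy, if_pos]
        simp only [PySem.List.insertBy, hb', Bool.false_eq_true, if_neg, not_false_iff]
        simp only [List.filter_cons, hqy, if_pos, ih ht]
    · have hqy' : q y = false := by simpa using hqy
      by_cases hb : pvKey y < pvKey x
      · have hfront : ∀ z ∈ t.filter q, (decide (pvKey z < pvKey x) : Bool) = true := by
          intro z hz
          exact decide_eq_true (lt_of_le_of_lt (hy z (List.mem_of_mem_filter hz)) hb)
        simp only [List.filter_cons, hqy', Bool.false_eq_true, if_neg, not_false_iff]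
        rw [pvInsertBy_front hfront]
        simp [PySem.List.insertBy, hb, hx, hqy']
      · have hb' : (decide (pvKey y < pvKey x)) = false := by simpa using hb
        simp only [List.filter_cons, hqy', Bool.false_eq_true, if_neg, not_false_iff]
        simp only [PySem.List.insertBy, hb', Bool.false_eq_true, if_neg, not_false_iff]
        simp only [List.filter_cons, hqy', Bool.false_eq_true, if_neg, not_false_iff, ih ht]

theorem pvS2' (q : String → Bool) : ∀ (l acc : List String),
    acc.Pairwise (fun a b => pvKey b ≤ pvKey a) →
    (l.foldl (fun acc x => PySem.List.insertBy (fun a b => decide (pvKey b < pvKey a)) x acc) acc).filter q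
      = (l.filter q).foldl (fun acc x => PySem.List.insertBy (fun a b => decide (pvKey b < pvKey a)) x acc) (acc.filter q) := by
  intro l
  induction l with
  | nil => intro acc _; rfl
  | cons x l ih =>
    intro acc hpw
    simp only [List.foldl_cons]
    rw [ih _ (pvIns_pw x hpw)]
    by_cases hx : q x = true
    · rw [← pvIns_filter_pos q hx acc hpw]
      simp [hx]
    · have hx' : q x = false := by simpa using hx
      rw [pvIns_filter_neg q hx' acc]
      simp [hx']

theorem pvS2 (q : String → Bool) (ms : List String) :
    PySem.List.sorted (ms.filter q) pvKey true = (PySem.List.sorted ms pvKey true).filter q := by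
  rw [PySem.List.sorted_rev_eq_foldl_insertBy, PySem.List.sorted_rev_eq_foldl_insertBy]
  exact (pvS2' q ms [] List.Pairwise.nil).symm

-- ---- B's filtered pass ----

def pvExtras : List String → List String → List String
  | [], _ => []
  | x :: l, k =>
    if k.any (fun t => PySem.Str.isIn x t) then pvExtras l k else x :: pvExtras l (k ++ [x])

theorem pvExt : ∀ (l k : List String), l.foldl pvStepB k = k ++ pvExtras l k := by
  intro l
  induction l with
  | nil => intro k; simp [pvExtras]
  | cons x l ih =>
    intro k
    by_cases h : k.any (fun t => PySem.Str.isIn x t) = true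
    · simp only [List.foldl_cons, pvStepB, h, if_pos, pvExtras]
      exact ih k
    · have h' : k.any (fun t => PySem.Str.isIn x t) = false := by simpa using h
      simp only [List.foldl_cons, pvStepB, h', Bool.false_eq_true, if_neg, not_false_iff, pvExtras]
      rw [ih (k ++ [x])]
      simp

theorem pvCong : ∀ (l k₁ k₂ : List String),
    (∀ x ∈ l, k₁.any (fun t => PySem.Str.isIn x t) = k₂.any (fun t => PySem.Str.isIn x t)) →
    pvExtras l k₁ = pvExtras l k₂ := by
  intro l
  induction l with
  | nil => intro _ _ _; rfl
  | cons x l ih =>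
    intro k₁ k₂ h
    have hx := h x List.mem_cons_self
    simp only [pvExtras, hx]
    by_cases hb : k₂.any (fun t => PySem.Str.isIn x t) = true
    · rw [if_pos hb, if_pos hb]
      exact ih k₁ k₂ (fun y hy => h y (List.mem_cons_of_mem _ hy))
    · rw [if_neg hb, if_neg hb]
      congr 1
      refine ih (k₁ ++ [x]) (k₂ ++ [x]) ?_
      intro y hy
      simp only [List.any_append, h y (List.mem_cons_of_mem _ hy)]

theorem pvG1 {m : String} : ∀ (l k : List String), m ∈ k →
    pvExtras l k = pvExtras (l.filter (fun x => !PySem.Str.isIn x m)) k := by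
  intro l
  induction l with
  | nil => intro _ _; rfl
  | cons x l ih =>
    intro k hm
    by_cases hx : PySem.Str.isIn x m = true
    · have hany : k.any (fun t => PySem.Str.isIn x t) = true :=
        List.any_eq_true.mpr ⟨m, hm, hx⟩
      simp only [pvExtras, hany, if_pos, List.filter_cons, hx, Bool.not_true,
        Bool.false_eq_true, if_neg, not_false_iff]
      exact ih k hm
    · have hx' : PySem.Str.isIn x m = false := by simpa using hx
      simp only [List.filter_cons, hx', Bool.not_false, if_pos, pvExtras]
      by_cases hb : k.any (fun t => PySem.Str.isIn x t) = true
      · rw [if_pos hb, if_pos hb]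
        exact ih k hm
      · rw [if_neg hb, if_neg hb]
        congr 1
        exact ih (k ++ [x]) (by simp [hm])

-- ---- master equivalence ----

theorem pvMaster : ∀ (n : Nat) (ms : List String), ms.length ≤ n →
    pvGoA ms [] = (PySem.List.sorted ms pvKey true).foldl pvStepB [] := by
  intro n
  induction n with
  | zero =>
    intro ms hms
    have : ms = [] := List.eq_nil_of_length_eq_zero (Nat.le_zero.mp hms)
    subst this
    rw [pvGoA_nil]; rfl
  | succ n ih =>
    intro ms hms
    by_cases hnil : ms = []
    · subst hnil; rw [pvGoA_nil]; rfl
    · have hlen : 0 < ms.length := List.length_pos_of_ne_nil hnil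
      obtain ⟨m, hmax⟩ : ∃ m, PySem.List.max? ms pvKey = some m := by
        cases hm : PySem.List.max? ms pvKey with
        | none => exact absurd ((PySem.List.max?_eq_none_iff ms pvKey).mp hm) hnil
        | some m => exact ⟨m, rfl⟩
      have hmem : m ∈ ms := PySem.List.max?_mem hmax
      have hlt := pvFilter_len_lt hmem
      have hle : (ms.filter (fun x => !PySem.Str.isIn x m)).length ≤ n := by omega
      -- LHS
      rw [pvRound hlen hmax [], pvGoA_acc n _ hle, ih _ hle]
      -- RHS
      rw [pvS1 hmax, List.foldl_cons]
      have hstep1 : pvStepB [] m = [m] := by simp [pvStepB]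
      rw [hstep1, pvExt, pvExt]
      have hfilt : (PySem.List.sorted (ms.erase m) pvKey true).filter (fun x => !PySem.Str.isIn x m)
          = PySem.List.sorted (ms.filter (fun x => !PySem.Str.isIn x m)) pvKey true := by
        rw [← pvS2 (fun x => !PySem.Str.isIn x m) (ms.erase m)]
        rw [pvFilter_erase (fun x => PySem.Str.isIn x m) (pvIsIn_self m) ms]
      rw [pvG1 (PySem.List.sorted (ms.erase m) pvKey true) [m] List.mem_cons_self, hfilt]
      have hnone : ∀ x ∈ PySem.List.sorted (ms.filter (fun x => !PySem.Str.isIn x m)) pvKey true,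
          PySem.Str.isIn x m = false := by
        intro x hx
        have h1 := (PySem.List.mem_sorted _ pvKey true x).mp hx
        have h2 := (List.mem_filter.mp h1).2
        simpa using h2
      rw [pvCong _ [m] [] (by
        intro x hx
        simp only [List.any_cons, List.any_nil, hnone x hx, Bool.or_false])]
      simp

-- ===== VERDICT (by name: the statement is the Claim_ definition above) =====
theorem remove_submatches_spec : Claim_equal_remove_submatches := by
  intro ms _
  unfold Spec_remove_submatches remove_submatches remove_submatches_alt
  exact pvMaster ms.length ms le_rfl
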